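-- pv_equiv track=rewrite | github.com/JulesInCyber/AdventOfCode | 2024/day_02b.py | base_check
-- ===== SOURCE A (Python) =====
-- def base_check(report):
--     # Basic check stays the same
--     increasing = all(x < y for x, y in zip(report, report[1:]))
--     decreasing = all(x > y for x, y in zip(report, report[1:]))
--     diff = [x - y for x, y in zip(report, report[1:])]
--     safe = all(abs(d) < 4 for d in diff)
--
--     if safe and (increasing or decreasing):
--         return True
--     else:
--         return False
-- ===== SOURCE B (Python) =====
-- def base_check(report):
--     # The report is safe iff the set of successive differences lies entirely
--     # in {1,2,3} (strictly increasing with small steps) or in {-1,-2,-3}.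
--     diffs = {y - x for x, y in zip(report, report[1:])}
--     return diffs <= {1, 2, 3} or diffs <= {-1, -2, -3}
-- ===== Notes on version B (the rewrite author's own statement) =====
-- stated objective: alternative
-- what changed: Replaces A's three separate pairwise predicates (strict increase, strict decrease, abs-diff bound) combined with and/or by building the set of successive differences once and testing set inclusion in {1,2,3} or {-1,-2,-3}.
import Mathlib
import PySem

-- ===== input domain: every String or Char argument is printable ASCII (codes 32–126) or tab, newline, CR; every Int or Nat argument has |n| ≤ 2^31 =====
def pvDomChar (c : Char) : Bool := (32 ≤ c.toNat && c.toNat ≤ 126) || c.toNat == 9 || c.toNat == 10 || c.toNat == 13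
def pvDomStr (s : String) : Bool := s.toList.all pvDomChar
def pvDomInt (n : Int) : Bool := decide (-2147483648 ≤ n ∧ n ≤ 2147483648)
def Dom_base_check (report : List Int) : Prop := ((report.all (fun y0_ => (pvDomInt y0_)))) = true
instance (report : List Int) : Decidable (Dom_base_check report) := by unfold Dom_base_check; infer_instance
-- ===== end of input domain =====

-- B builds the set of successive differences and tests inclusion in {1,2,3} or {-1,-2,-3}
-- instead of A's three separate pairwise predicates; objective: alternative formulation.

-- ===== PORT A =====
def base_check (report : List Int) : Bool :=
  let pairs := report.zip report.tail
  let increasing := pairs.all (fun p => decide (p.1 < p.2))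
  let decreasing := pairs.all (fun p => decide (p.1 > p.2))
  let diff := pairs.map (fun p => p.1 - p.2)
  let safe := diff.all (fun d => decide (d.natAbs < 4))
  if safe && (increasing || decreasing) then true else false

-- ===== PORT B =====
def base_check_alt (report : List Int) : Bool :=
  let diffs : PySem.Set Int :=
    PySem.Set.ofList ((report.zip report.tail).map (fun p => p.2 - p.1))
  PySem.Set.issubset diffs (PySem.Set.ofList [1, 2, 3]) ||
    PySem.Set.issubset diffs (PySem.Set.ofList [-1, -2, -3])

-- ===== PRECONDITION & SPEC =====
def Spec_base_check (report : List Int) (out : Bool) : Prop := out = base_check_alt report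
instance (report : List Int) (out : Bool) : Decidable (Spec_base_check report out) := by unfold Spec_base_check; infer_instance

-- ===== CLAIM =====
def Claim_equal_base_check : Prop := ∀ (report : List Int), Dom_base_check report → Spec_base_check report (base_check report)

-- ===== LEMMAS AND PROOFS =====

theorem issubset_ofList_left {α : Type} [BEq α] [LawfulBEq α] (l : List α) (t : PySem.Set α) :
    PySem.Set.issubset (PySem.Set.ofList l) t = l.all (fun x => t.contains x) := by
  rcases h : PySem.Set.issubset (PySem.Set.ofList l) t with _ | _
  · symm
    by_contra hall
    rw [Bool.not_eq_false, List.all_eq_true] at hall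
    rw [← Bool.not_eq_true, PySem.Set.issubset_iff] at h
    exact h (fun x hx => by simpa using hall x (by simpa [PySem.Set.mem_ofList] using hx))
  · symm
    rw [PySem.Set.issubset_iff] at h
    rw [List.all_eq_true]
    intro x hx
    simpa using h x (by simp [PySem.Set.mem_ofList, hx])

-- ===== VERDICT =====
theorem base_check_spec : Claim_equal_base_check := by
  intro report _
  unfold Spec_base_check base_check base_check_alt
  dsimp only
  rw [issubset_ofList_left, issubset_ofList_left,
    PySem.Set.ofList_eq_self_of_nodup (xs := [(1 : Int), 2, 3]) (by decide),
    PySem.Set.ofList_eq_self_of_nodup (xs := [(-1 : Int), -2, -3]) (by decide)]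
  by_cases h :
      (((report.zip report.tail).map (fun p => p.1 - p.2)).all
          (fun d => decide (d.natAbs < 4)) &&
        ((report.zip report.tail).all (fun p => decide (p.1 < p.2)) ||
          (report.zip report.tail).all (fun p => decide (p.1 > p.2)))) = true
  · rw [if_pos h]
    symm
    simp only [Bool.and_eq_true, Bool.or_eq_true, List.all_eq_true, List.all_map,
      Function.comp_def, decide_eq_true_eq, gt_iff_lt] at h ⊢
    obtain ⟨hsafe, hmono⟩ := h
    rcases hmono with hm | hm <;> [left; right] <;>
      · intro p hp
        have h1 := hm p hp
        have h2 := hsafe p hp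
        simp only [PySem.Set.contains, List.contains_eq_mem, List.mem_cons,
          List.not_mem_nil, or_false, decide_eq_true_eq]
        omega
  · rw [if_neg h]
    symm
    rw [← Bool.not_eq_true]
    intro hsub
    apply h
    simp only [Bool.or_eq_true, List.all_eq_true, List.all_map, Function.comp_def] at hsub
    simp only [Bool.and_eq_true, Bool.or_eq_true, List.all_eq_true, List.all_map,
      Function.comp_def, decide_eq_true_eq, gt_iff_lt]
    rcases hsub with hs | hs <;>
      [ (refine ⟨?_, Or.inl ?_⟩) ; (refine ⟨?_, Or.inr ?_⟩) ] <;>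
      · intro p hp
        have := hs p hp
        simp only [PySem.Set.contains, List.contains_eq_mem, List.mem_cons,
          List.not_mem_nil, or_false, decide_eq_true_eq] at this
        omega
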